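-- pv_equiv track=rewrite | github.com/sschlingmann04/Advent-of-Code | 2015/day24.py | findIdealQuantumEntanglement
-- ===== SOURCE A (Python) =====
-- from itertools import product
-- from math import inf
--
-- def findIdealQuantumEntanglement(weights: list[int], groups: int):
--     # Get the weight per group (sum of all weights divided by the number of groups)
--     weight_per_group = int(sum(weights) / groups)
--     package_count = 0
--     ideal_configs = []
--
--     # Find only the configurations with the smallest package count that sum to the proper group weight (calculated above)
--     while len(ideal_configs) == 0:
--         package_count += 1
--         ideal_configs = [x for x in product(weights, repeat=package_count) if sum(x) == weight_per_group and len(set(x)) == len(x)]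
--
--     # Find the quantum entanglement of each configuration and return the lowest one
--     QE = inf
--     for i in ideal_configs:
--         current_QE = 1
--         for num in i:
--             current_QE *= num
--         QE = min(current_QE, QE)
--
--     return QE
-- ===== SOURCE B (Python) =====
-- # Faster exact re-implementation: instead of enumerating all ordered k-tuples drawn from
-- # `weights` (O(n^k)) and filtering out those with repeated values, enumerate unordered
-- # combinations of the distinct weight values for increasing sizes (O(C(d,k)) per size).
-- from itertools import combinations
-- from math import prod
--
--
-- def findIdealQuantumEntanglement(weights: list[int], groups: int):
--     target = int(sum(weights) / groups)
--     vals = list(dict.fromkeys(weights))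
--     for k in range(1, len(vals) + 1):
--         qes = [prod(c) for c in combinations(vals, k) if sum(c) == target]
--         if qes:
--             return min(qes)
--     raise ValueError("no valid configuration")
-- ===== Notes on version B (the rewrite author's own statement) =====
-- stated objective: faster
-- what changed: A enumerates all ordered k-tuples of weights via itertools.product and filters out those with repeated values; B deduplicates the weights once and enumerates unordered itertools.combinations of increasing size, so each candidate set is generated once instead of k! times with duplicates.
import Mathlib
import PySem

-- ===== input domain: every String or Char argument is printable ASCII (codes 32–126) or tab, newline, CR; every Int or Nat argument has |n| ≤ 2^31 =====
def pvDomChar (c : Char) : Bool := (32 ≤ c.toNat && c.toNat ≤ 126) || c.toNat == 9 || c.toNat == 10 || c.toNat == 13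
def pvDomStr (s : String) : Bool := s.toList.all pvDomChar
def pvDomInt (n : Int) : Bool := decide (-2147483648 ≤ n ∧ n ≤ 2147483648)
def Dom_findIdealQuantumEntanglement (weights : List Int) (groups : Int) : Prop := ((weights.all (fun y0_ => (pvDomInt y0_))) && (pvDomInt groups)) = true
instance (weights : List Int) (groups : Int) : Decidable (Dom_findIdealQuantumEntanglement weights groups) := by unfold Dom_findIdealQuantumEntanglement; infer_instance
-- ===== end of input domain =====

-- B replaces A's enumeration of all ordered k-tuples (itertools.product + distinctness filter)
-- by combinations of the deduplicated weights for increasing k; equal where A returns (A's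
-- while-loop diverges when no configuration exists — excluded by Pre_).

-- ===== PORT A =====
-- itertools.product(weights, repeat=k) (leftmost coordinate varies slowest)
def pvProdRep (weights : List Int) : Nat → List (List Int)
  | 0 => [[]]
  | k+1 => (pvProdRep weights k).flatMap (fun t => weights.map (fun w => t ++ [w]))

-- the list comprehension: [x for x in product(weights, repeat=k) if sum(x) == target and len(set(x)) == len(x)]
def pvAConfigs (weights : List Int) (target : Int) (k : Nat) : List (List Int) :=
  (pvProdRep weights k).filter
    (fun x => x.sum == target && PySem.Set.len (PySem.Set.ofList x) == (x.length : Int))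

-- QE = inf; for i in configs: current = prod(i) by the inner loop; QE = min(current, QE)
-- (none plays math.inf; A only reads QE after the while-loop guaranteed configs ≠ [])
def pvAMin (cfgs : List (List Int)) : Option Int :=
  cfgs.foldl (fun qe c =>
    let p := c.foldl (· * ·) 1
    match qe with
    | none => some p
    | some q => some (min p q)) none

-- the while-loop; fuel = len(weights) suffices under Pre_ (a valid config has ≤ len(weights)
-- distinct values); on exhaustion (A would loop forever) it returns 0, outside Pre_
def pvALoop (weights : List Int) (target : Int) : Nat → Nat → Int
  | 0, _ => 0
  | fuel+1, k =>
    let cfgs := pvAConfigs weights target k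
    if cfgs.isEmpty then pvALoop weights target fuel (k+1)
    else (pvAMin cfgs).getD 0

-- int(sum(weights)/groups): PySem.Int.truncdiv is exact for |sum| < 2^53 (any Dom list of
-- fewer than ~4·10^6 elements)
def findIdealQuantumEntanglement (weights : List Int) (groups : Int) : Int :=
  pvALoop weights (PySem.Int.truncdiv weights.sum groups) weights.length 1

-- ===== PORT B =====
-- itertools.combinations(vals, k)
def pvCombos : Nat → List Int → List (List Int)
  | 0, _ => [[]]
  | _+1, [] => []
  | k+1, x :: xs => (pvCombos k xs).map (x :: ·) ++ pvCombos (k+1) xs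

-- for k in range(1, len(vals)+1): qes = [prod(c) for c in combinations(vals, k) if sum(c) == target];
-- if qes: return min(qes)  — fuel counts the remaining range; on exhaustion B raises ValueError
def pvBLoop (vals : List Int) (target : Int) : Nat → Nat → Int
  | 0, _ => 0
  | fuel+1, k =>
    let qes := ((pvCombos k vals).filter (fun c => c.sum == target)).map (fun c => c.prod)
    if qes.isEmpty then pvBLoop vals target fuel (k+1)
    else (PySem.List.min? qes (fun x => x)).getD 0

def findIdealQuantumEntanglement_alt (weights : List Int) (groups : Int) : Int :=
  let vals := PySem.List.dedup weights
  pvBLoop vals (PySem.Int.truncdiv weights.sum groups) vals.length 1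

-- ===== PRECONDITION & SPEC =====
-- Pre_ excludes groups = 0 (A raises ZeroDivisionError) and the inputs with no nonempty set of
-- distinct weight values summing to the target, on which A's while-loop never terminates.
def Pre_findIdealQuantumEntanglement (weights : List Int) (groups : Int) : Prop :=
  groups ≠ 0 ∧
  ∃ s ∈ (PySem.List.dedup weights).sublists,
    s ≠ [] ∧ s.sum = PySem.Int.truncdiv weights.sum groups

instance (weights : List Int) (groups : Int) : Decidable (Pre_findIdealQuantumEntanglement weights groups) := by unfold Pre_findIdealQuantumEntanglement; infer_instance

def pvWitness_findIdealQuantumEntanglement : List Int × Int := ([1, 2, 3], 3)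

def Spec_findIdealQuantumEntanglement (weights : List Int) (groups : Int) (out : Int) : Prop := out = findIdealQuantumEntanglement_alt weights groups
instance (weights : List Int) (groups : Int) (out : Int) : Decidable (Spec_findIdealQuantumEntanglement weights groups out) := by unfold Spec_findIdealQuantumEntanglement; infer_instance

-- ===== CLAIM (what is proved, stated in full; the proofs are below) =====
def Claim_equal_findIdealQuantumEntanglement : Prop := ∀ (weights : List Int) (groups : Int), Dom_findIdealQuantumEntanglement weights groups → Pre_findIdealQuantumEntanglement weights groups → Spec_findIdealQuantumEntanglement weights groups (findIdealQuantumEntanglement weights groups)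

-- ===== LEMMAS AND PROOFS =====

-- the products of A's valid configurations at tuple length k
def pvAP (weights : List Int) (target : Int) (k : Nat) : List Int :=
  (pvAConfigs weights target k).map (fun c => c.foldl (· * ·) 1)

-- the products of B's valid combinations at size k
def pvBP (weights : List Int) (target : Int) (k : Nat) : List Int :=
  (((pvCombos k (PySem.List.dedup weights)).filter (fun c => c.sum == target)).map
    (fun c => c.prod))

lemma mem_pvProdRep (weights : List Int) (k : Nat) (t : List Int) :
    t ∈ pvProdRep weights k ↔ t.length = k ∧ ∀ a ∈ t, a ∈ weights := by
  induction k generalizing t with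
  | zero => simp [pvProdRep, List.length_eq_zero_iff]; rintro rfl; simp
  | succ k ih =>
    simp only [pvProdRep, List.mem_flatMap, List.mem_map]
    constructor
    · rintro ⟨t', ht', w, hw, rfl⟩
      obtain ⟨hlen, hmem⟩ := (ih t').1 ht'
      refine ⟨by simp [hlen], ?_⟩
      intro a ha
      rcases List.mem_append.1 ha with h | h
      · exact hmem a h
      · simp at h; exact h ▸ hw
    · rintro ⟨hlen, hmem⟩
      have hne : t ≠ [] := by intro h; subst h; simp at hlen
      refine ⟨t.dropLast, (ih t.dropLast).2 ⟨?_, ?_⟩, t.getLast hne, ?_, ?_⟩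
      · simp [hlen]
      · exact fun a ha => hmem a (List.dropLast_subset t ha)
      · exact hmem _ (List.getLast_mem hne)
      · exact (List.dropLast_append_getLast hne)

lemma mem_pvCombos (k : Nat) (vs c : List Int) :
    c ∈ pvCombos k vs ↔ c.Sublist vs ∧ c.length = k := by
  induction vs generalizing k c with
  | nil =>
    cases k with
    | zero =>
      simp only [pvCombos, List.mem_singleton]
      constructor
      · rintro rfl; exact ⟨List.Sublist.refl [], rfl⟩
      · rintro ⟨hs, hl⟩; exact List.length_eq_zero_iff.1 hl
    | succ k =>
      simp only [pvCombos, List.not_mem_nil, false_iff]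
      rintro ⟨hs, hl⟩
      rw [List.sublist_nil] at hs
      subst hs; simp at hl
  | cons x xs ih =>
    cases k with
    | zero =>
      simp only [pvCombos, List.mem_singleton]
      constructor
      · rintro rfl; exact ⟨List.nil_sublist _, rfl⟩
      · rintro ⟨_, hl⟩; exact List.length_eq_zero_iff.1 hl
    | succ k =>
      simp only [pvCombos, List.mem_append, List.mem_map]
      constructor
      · rintro (⟨c', hc', rfl⟩ | h)
        · obtain ⟨hs, hl⟩ := (ih k c').1 hc'
          exact ⟨List.cons_sublist_cons.2 hs, by simp [hl]⟩
        · obtain ⟨hs, hl⟩ := (ih (k+1) c).1 h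
          exact ⟨hs.trans (List.sublist_cons_self x xs), hl⟩
      · rintro ⟨hs, hl⟩
        rcases List.sublist_cons_iff.1 hs with h | ⟨r, rfl, hr⟩
        · exact Or.inr ((ih (k+1) c).2 ⟨h, hl⟩)
        · exact Or.inl ⟨r, (ih k r).2 ⟨hr, by simpa using hl⟩, rfl⟩

-- A's distinctness test len(set(x)) == len(x) is Nodup
lemma setlen_iff_nodup (x : List Int) :
    (PySem.Set.len (PySem.Set.ofList x) == (x.length : Int)) = true ↔ x.Nodup := by
  have hlen : (PySem.Set.len (PySem.Set.ofList x) == (x.length : Int)) = true ↔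
      (PySem.Set.ofList x).length = x.length := by
    simp [PySem.Set.len]
  rw [hlen]
  constructor
  · intro h
    obtain ⟨l, hperm, hsub⟩ := List.subperm_of_subset (PySem.Set.nodup_ofList x)
      (fun a ha => (PySem.Set.mem_ofList x a).1 ha)
    have hl : l.length = x.length := by rw [hperm.length_eq, h]
    have : l = x := hsub.eq_of_length hl
    exact this ▸ (hperm.nodup_iff.2 (PySem.Set.nodup_ofList x))
  · intro h
    have hp : (PySem.Set.ofList x).Perm x := by
      apply List.perm_of_nodup_nodup_toFinset_eq (PySem.Set.nodup_ofList x) h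
      ext a; simp [PySem.Set.mem_ofList]
    exact hp.length_eq

-- the same products appear at level k on both sides
lemma mem_pvAP_iff_pvBP (weights : List Int) (target : Int) (k : Nat) (p : Int) :
    p ∈ pvAP weights target k ↔ p ∈ pvBP weights target k := by
  constructor
  · intro hp
    obtain ⟨t, ht, rfl⟩ := List.mem_map.1 hp
    obtain ⟨htm, htf⟩ := List.mem_filter.1 ht
    obtain ⟨hlen, hmem⟩ := (mem_pvProdRep weights k t).1 htm
    have hsum : t.sum = target := by
      have := htf; simp only [Bool.and_eq_true, beq_iff_eq] at this; exact this.1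
    have hnd : t.Nodup := (setlen_iff_nodup t).1 (by
      have := htf; simp only [Bool.and_eq_true] at this; exact this.2)
    have hsubp : t.Subperm (PySem.List.dedup weights) :=
      List.subperm_of_subset hnd
        (fun a ha => (PySem.List.mem_dedup weights a).2 (hmem a ha))
    obtain ⟨c, hcp, hcs⟩ := hsubp
    refine List.mem_map.2 ⟨c, List.mem_filter.2 ⟨(mem_pvCombos k _ c).2
      ⟨hcs, by rw [hcp.length_eq, hlen]⟩, by simp [hcp.sum_eq, hsum]⟩, ?_⟩
    rw [hcp.prod_eq]; exact List.prod_eq_foldl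
  · intro hp
    obtain ⟨c, hc, rfl⟩ := List.mem_map.1 hp
    obtain ⟨hcm, hcf⟩ := List.mem_filter.1 hc
    obtain ⟨hcs, hlen⟩ := (mem_pvCombos k _ c).1 hcm
    have hnd : c.Nodup := hcs.nodup (PySem.List.nodup_dedup weights)
    have hmem : ∀ a ∈ c, a ∈ weights := fun a ha =>
      (PySem.List.mem_dedup weights a).1 (hcs.subset ha)
    refine List.mem_map.2 ⟨c, List.mem_filter.2 ⟨(mem_pvProdRep weights k c).2
      ⟨hlen, hmem⟩, ?_⟩, List.prod_eq_foldl.symm⟩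
    simp only [Bool.and_eq_true, beq_iff_eq] at hcf ⊢
    refine ⟨hcf, ?_⟩
    have := (setlen_iff_nodup c).2 hnd
    simpa using this

lemma pvAP_nil_iff (weights : List Int) (target : Int) (k : Nat) :
    pvAP weights target k = [] ↔ pvBP weights target k = [] := by
  simp only [List.eq_nil_iff_forall_not_mem]
  exact ⟨fun h p hp => h p ((mem_pvAP_iff_pvBP weights target k p).2 hp),
         fun h p hp => h p ((mem_pvAP_iff_pvBP weights target k p).1 hp)⟩

-- A's running-min fold returns the minimum of the product list
lemma pvAMin_go (l : List Int) : ∀ (q : Int),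
    ∃ m, l.foldl (fun qe p => match qe with
          | none => some p
          | some q' => some (min p q')) (some q) = some m ∧
      (m = q ∨ m ∈ l) ∧ m ≤ q ∧ ∀ y ∈ l, m ≤ y := by
  induction l with
  | nil => intro q; exact ⟨q, rfl, Or.inl rfl, le_refl q, by simp⟩
  | cons x t ih =>
    intro q
    obtain ⟨m, hm, hmem, hle, hall⟩ := ih (min x q)
    refine ⟨m, hm, ?_, ?_, ?_⟩
    · rcases hmem with h | h
      · rcases min_cases x q with ⟨he, _⟩ | ⟨he, _⟩
        · exact Or.inr (by simp [h, he])
        · exact Or.inl (by rw [h, he])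
      · exact Or.inr (List.mem_cons_of_mem x h)
    · exact le_trans hle (min_le_right x q)
    · intro y hy
      rcases List.mem_cons.1 hy with rfl | hy
      · exact le_trans hle (min_le_left y q)
      · exact hall y hy

lemma pvAMin_eq (cfgs : List (List Int)) :
    pvAMin cfgs = (cfgs.map (fun c => c.foldl (· * ·) 1)).foldl
      (fun qe p => match qe with
        | none => some p
        | some q' => some (min p q')) none := by
  unfold pvAMin; rw [List.foldl_map]

lemma pvAMin_spec (cfgs : List (List Int)) (h : cfgs ≠ []) :
    ∃ m, pvAMin cfgs = some m ∧ m ∈ cfgs.map (fun c => c.foldl (· * ·) 1) ∧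
      ∀ y ∈ cfgs.map (fun c => c.foldl (· * ·) 1), m ≤ y := by
  obtain ⟨c, t, rfl⟩ := List.exists_cons_of_ne_nil h
  obtain ⟨m, hm, hmem, hle, hall⟩ := pvAMin_go (t.map (fun c => c.foldl (· * ·) 1))
    (c.foldl (· * ·) 1)
  refine ⟨m, ?_, ?_, ?_⟩
  · rw [pvAMin_eq, List.map_cons, List.foldl_cons]; exact hm
  · rw [List.map_cons]
    rcases hmem with h | h
    · exact h ▸ List.mem_cons_self
    · exact List.mem_cons_of_mem _ h
  · intro y hy
    rw [List.map_cons] at hy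
    rcases List.mem_cons.1 hy with rfl | hy'
    · exact hle
    · exact hall y hy'

-- the two loops agree while some reachable level is nonempty
lemma loops_eq (weights : List Int) (target : Int) :
    ∀ (fA : Nat), ∀ (fB k : Nat),
    (∃ j, k ≤ j ∧ j < k + fA ∧ j < k + fB ∧ pvAP weights target j ≠ []) →
    pvALoop weights target fA k = pvBLoop (PySem.List.dedup weights) target fB k := by
  intro fA
  induction fA with
  | zero => rintro fB k ⟨j, h1, h2, _⟩; omega
  | succ fA ih =>
    rintro fB k ⟨j, hkj, hjA, hjB, hne⟩
    cases fB with
    | zero => omega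
    | succ fB =>
      by_cases hk : pvAP weights target k = []
      · have hbk : pvBP weights target k = [] := (pvAP_nil_iff weights target k).1 hk
        have hcfg : (pvAConfigs weights target k).isEmpty = true := by
          simp only [List.isEmpty_iff]
          have hk' := hk; unfold pvAP at hk'
          exact List.map_eq_nil_iff.1 hk'
        have hqes : (((pvCombos k (PySem.List.dedup weights)).filter
            (fun c => c.sum == target)).map (fun c => c.prod)).isEmpty = true := by
          simp only [List.isEmpty_iff]; exact hbk
        rw [pvALoop, pvBLoop]
        simp only [hcfg, hqes, if_pos]
        exact ih fB (k+1) ⟨j, by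
          refine ⟨?_, by omega, by omega, hne⟩
          rcases Nat.eq_or_lt_of_le hkj with rfl | h
          · exact absurd hk hne
          · omega⟩
      · have hbk : pvBP weights target k ≠ [] := fun h => hk ((pvAP_nil_iff weights target k).2 h)
        have hcfg : (pvAConfigs weights target k).isEmpty = false := by
          simp only [List.isEmpty_eq_false_iff]
          intro hc; exact hk (by simp [pvAP, hc])
        have hqes : (((pvCombos k (PySem.List.dedup weights)).filter
            (fun c => c.sum == target)).map (fun c => c.prod)).isEmpty = false := by
          simp only [List.isEmpty_eq_false_iff]; exact hbk
        rw [pvALoop, pvBLoop]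
        simp only [hcfg, hqes, Bool.false_eq_true, if_false]
        show (pvAMin (pvAConfigs weights target k)).getD 0 =
          (PySem.List.min? (pvBP weights target k) (fun x => x)).getD 0
        -- both sides are the minimum of lists with the same members
        have hane : pvAConfigs weights target k ≠ [] := by
          intro hc; exact hk (by simp [pvAP, hc])
        obtain ⟨m, hm, hmm, hml⟩ := pvAMin_spec (pvAConfigs weights target k) hane
        cases hmin : PySem.List.min? (pvBP weights target k) (fun x => x) with
        | none => exact absurd ((PySem.List.min?_eq_none_iff _ _).1 hmin) hbk
        | some m' =>
          have hm'm : m' ∈ pvBP weights target k := PySem.List.min?_mem hmin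
          have hm'l : ∀ y ∈ pvBP weights target k, m' ≤ y := PySem.List.min?_isMin hmin
          have hmm' : m = m' := by
            apply le_antisymm
            · exact hml m' ((mem_pvAP_iff_pvBP weights target k m').2 hm'm)
            · exact hm'l m ((mem_pvAP_iff_pvBP weights target k m).1 hmm)
          rw [hm, hmm']

lemma dedup_length_le (weights : List Int) :
    (PySem.List.dedup weights).length ≤ weights.length := by
  obtain ⟨l, hperm, hsub⟩ := List.subperm_of_subset (PySem.List.nodup_dedup weights)
    (fun a ha => (PySem.List.mem_dedup weights a).1 ha)
  calc (PySem.List.dedup weights).length = l.length := hperm.length_eq.symm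
    _ ≤ weights.length := hsub.length_le

-- ===== VERDICT (by name: the statement is the Claim_ definition above) =====
theorem findIdealQuantumEntanglement_spec : Claim_equal_findIdealQuantumEntanglement := by
  intro weights groups _ hpre
  obtain ⟨_, s, hs, hne, hsum⟩ := hpre
  unfold Spec_findIdealQuantumEntanglement
  unfold findIdealQuantumEntanglement findIdealQuantumEntanglement_alt
  set target := PySem.Int.truncdiv weights.sum groups with htarget
  have hsl : s.Sublist (PySem.List.dedup weights) := List.mem_sublists.1 hs
  have hlen1 : 1 ≤ s.length := by
    cases s with
    | nil => exact absurd rfl hne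
    | cons a t => simp
  have hlenv : s.length ≤ (PySem.List.dedup weights).length := hsl.length_le
  have hjne : pvBP weights target s.length ≠ [] := by
    intro h
    have : s.prod ∈ pvBP weights target s.length := by
      refine List.mem_map.2 ⟨s, List.mem_filter.2 ⟨(mem_pvCombos s.length _ s).2
        ⟨hsl, rfl⟩, by simp [hsum]⟩, rfl⟩
    rw [h] at this; exact List.not_mem_nil this
  have hane : pvAP weights target s.length ≠ [] := by
    intro h; exact hjne ((pvAP_nil_iff weights target s.length).1 h)
  exact (loops_eq weights target weights.length (PySem.List.dedup weights).length 1
    ⟨s.length, hlen1, by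
      have := dedup_length_le weights; omega, by omega, hane⟩).symm ▸ rfl
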